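-- pv_equiv track=rewrite | github.com/Tools-Automation-Vector-Team/Autodeployment-Mock | zabbix/external_scripts/vu_report.py | analyze_zero_sequences
-- ===== SOURCE A (Python) =====
-- def analyze_zero_sequences(values):
--     """Analyze zero sequences and total count of zeros."""
--     total_zeros = 0
--     zero_sequences = []
--     current_count = 0
--
--     for value in values:
--         if value == 0:
--             total_zeros += 1
--             current_count += 1
--         else:
--             if current_count > 0:
--                 zero_sequences.append(current_count)
--                 current_count = 0
--
--     # Check for a sequence ending at the end of the list
--     if current_count > 0:
--         zero_sequences.append(current_count)
--
--     return total_zeros, zero_sequences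
-- ===== SOURCE B (Python) =====
-- def analyze_zero_sequences(values):
--     """Analyze zero sequences and total count of zeros."""
--     zero_sequences = []
--     i, n = 0, len(values)
--     while i < n:
--         if values[i] == 0:
--             j = i
--             while j < n and values[j] == 0:
--                 j += 1
--             zero_sequences.append(j - i)
--             i = j
--         else:
--             i += 1
--     return sum(zero_sequences), zero_sequences
-- ===== Notes on version B (the rewrite author's own statement) =====
-- stated objective: alternative
-- what changed: Replaces A's single-pass running-counter state machine with run extraction: an outer scan that, at each zero, consumes the whole maximal zero run with an inner scan and records its length, with the zero total computed at the end as the sum of the run lengths.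
import Mathlib
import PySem

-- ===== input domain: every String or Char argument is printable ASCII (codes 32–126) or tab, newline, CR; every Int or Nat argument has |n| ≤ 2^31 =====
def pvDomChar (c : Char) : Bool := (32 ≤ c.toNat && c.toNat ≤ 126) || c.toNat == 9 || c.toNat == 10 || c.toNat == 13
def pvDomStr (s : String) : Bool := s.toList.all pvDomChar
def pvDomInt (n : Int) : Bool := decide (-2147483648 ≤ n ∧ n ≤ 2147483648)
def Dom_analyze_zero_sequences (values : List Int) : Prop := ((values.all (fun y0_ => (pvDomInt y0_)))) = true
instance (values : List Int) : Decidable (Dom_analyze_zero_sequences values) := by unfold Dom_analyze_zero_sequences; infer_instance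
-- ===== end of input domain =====

-- B replaces A's running-counter state machine with maximal-zero-run extraction
-- (an inner scan per run, the zero total taken as the sum of run lengths at the end):
-- an alternative decomposition of the same linear pass.


-- ===== PORT A =====
-- A's for-loop, step for step, as structural recursion over the loop state
-- (total_zeros, zero_sequences, current_count); the [] case is the trailing
-- "sequence ending at the end of the list" check plus the return.
def goA : List Int → Int → List Int → Int → Int × List Int
  | [], total, seqs, cur => if cur > 0 then (total, seqs ++ [cur]) else (total, seqs)
  | v :: t, total, seqs, cur =>
      if v = 0 then goA t (total + 1) seqs (cur + 1)
      else if cur > 0 then goA t total (seqs ++ [cur]) 0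
      else goA t total seqs cur

def analyze_zero_sequences (values : List Int) : Int × List Int :=
  goA values 0 [] 0

-- ===== PORT B =====
-- Source B's inner while loop: the length (j - i) of the maximal zero prefix, and the rest.
def takeRun : List Int → Int × List Int
  | [] => (0, [])
  | v :: t =>
      if v = 0 then
        let (k, r) := takeRun t
        (k + 1, r)
      else (0, v :: t)

-- needed by runs' termination proof
theorem takeRun_len : ∀ (vs : List Int), (takeRun vs).2.length ≤ vs.length
  | [] => by simp [takeRun]
  | v :: t => by
      by_cases h : v = 0
      · have := takeRun_len t
        simp [takeRun, h]
        omega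
      · simp [takeRun, h]

-- Source B's outer while loop: the list of zero-run lengths (zero_sequences).
def runs : List Int → List Int
  | [] => []
  | v :: t =>
      if v = 0 then
        ((takeRun t).1 + 1) :: runs (takeRun t).2
      else runs t
termination_by vs => vs.length
decreasing_by
  · have := takeRun_len t
    simp only [List.length_cons]
    omega
  · simp

def analyze_zero_sequences_alt (values : List Int) : Int × List Int :=
  let seqs := runs values
  (seqs.sum, seqs)

-- ===== PRECONDITION & SPEC =====
def Spec_analyze_zero_sequences (values : List Int) (out : Int × List Int) : Prop := out = analyze_zero_sequences_alt values
instance (values : List Int) (out : Int × List Int) : Decidable (Spec_analyze_zero_sequences values out) := by unfold Spec_analyze_zero_sequences; infer_instance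

-- ===== CLAIM (what is proved, stated in full; the proofs are below) =====
def Claim_equal_analyze_zero_sequences : Prop := ∀ (values : List Int), Dom_analyze_zero_sequences values → Spec_analyze_zero_sequences values (analyze_zero_sequences values)

-- ===== LEMMAS AND PROOFS =====

-- With a run in progress, A's loop absorbs the maximal zero prefix into cur (and total).
theorem goA_zero_phase : ∀ (vs : List Int) (total : Int) (seqs : List Int) (cur : Int),
    goA vs total seqs cur = goA (takeRun vs).2 (total + (takeRun vs).1) seqs (cur + (takeRun vs).1)
  | [], total, seqs, cur => by simp [takeRun]
  | v :: t, total, seqs, cur => by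
      by_cases h : v = 0
      · have ih := goA_zero_phase t (total + 1) seqs (cur + 1)
        simp only [goA, takeRun, h, if_pos]
        rw [ih]
        rw [show total + 1 + (takeRun t).1 = total + ((takeRun t).1 + 1) from by ring,
            show cur + 1 + (takeRun t).1 = cur + ((takeRun t).1 + 1) from by ring]
      · simp [takeRun, h]

theorem takeRun_head_ne : ∀ (vs : List Int) (w : Int) (r : List Int),
    (takeRun vs).2 = w :: r → w ≠ 0
  | [], w, r => by simp [takeRun]
  | v :: t, w, r => by
      by_cases h : v = 0
      · simpa [takeRun, h] using takeRun_head_ne t w r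
      · simp only [takeRun, h, if_false]
        rintro hwr
        rw [List.cons.injEq] at hwr
        omega

theorem takeRun_nonneg : ∀ (vs : List Int), 0 ≤ (takeRun vs).1
  | [] => by simp [takeRun]
  | v :: t => by
      by_cases h : v = 0
      · have := takeRun_nonneg t
        simp [takeRun, h]; omega
      · simp [takeRun, h]

-- Main invariant: A's loop started with current_count = 0 produces exactly B's run list.
theorem goA_runs : ∀ (vs : List Int) (total : Int) (seqs : List Int),
    goA vs total seqs 0 = (total + (runs vs).sum, seqs ++ runs vs)
  | [], total, seqs => by simp [goA, runs]
  | v :: t, total, seqs => by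
      by_cases h : v = 0
      · subst h
        have hk := takeRun_nonneg t
        simp only [goA, zero_add]
        rw [goA_zero_phase t (total + 1) seqs 1,
            show runs (0 :: t) = ((takeRun t).1 + 1) :: runs (takeRun t).2 from by simp [runs],
            show (1:Int) + (takeRun t).1 = (takeRun t).1 + 1 from by ring,
            show total + 1 + (takeRun t).1 = total + ((takeRun t).1 + 1) from by ring]
        rcases hr : (takeRun t).2 with _ | ⟨w, r'⟩
        · simp [goA, runs]
          omega
        · have hw : w ≠ 0 := takeRun_head_ne t w r' hr
          have hlen : r'.length < t.length + 1 := by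
            have := takeRun_len t; rw [hr] at this; simp at this; omega
          simp only [goA, hw, if_false,
            if_pos (show (takeRun t).1 + 1 > 0 by omega)]
          rw [goA_runs r' (total + ((takeRun t).1 + 1)) (seqs ++ [(takeRun t).1 + 1])]
          simp [runs, hw]
          ring
      · simp only [goA, h, if_false,
          if_neg (show ¬ ((0:Int) > 0) by omega)]
        rw [goA_runs t total seqs,
            show runs (v :: t) = runs t from by simp [runs, h]]
termination_by vs => vs.length

-- ===== VERDICT (by name: the statement is the Claim_ definition above) =====
theorem analyze_zero_sequences_spec : Claim_equal_analyze_zero_sequences := by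
  intro values _
  unfold Spec_analyze_zero_sequences analyze_zero_sequences analyze_zero_sequences_alt
  rw [goA_runs]
  simp
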